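-- pv_equiv track=rewrite | github.com/PabloeCancino/TME_Nudos | Codigo/reverse_engineer_rational.py | get_determinant
-- ===== SOURCE A (Python) =====
-- from typing import List, Tuple, Dict, Optional
--
-- def get_determinant(coeffs: List[int]) -> int:
--     """Calculate determinant |P(-1)| from coefficients."""
--     val = 0
--     for i, c in enumerate(coeffs):
--         if i % 2 == 0:
--             val += c
--         else:
--             val -= c
--     return abs(val)
-- ===== SOURCE B (Python) =====
-- def get_determinant(coeffs):
--     """Calculate determinant |P(-1)| from coefficients."""
--     val = 0
--     for c in reversed(coeffs):
--         val = val * (-1) + c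
--     return abs(val)
-- ===== Notes on version B (the rewrite author's own statement) =====
-- stated objective: alternative
-- what changed: B evaluates the polynomial at -1 by Horner's multiply-accumulate recurrence over the reversed coefficient list, eliminating A's enumerate/parity branch.
import Mathlib
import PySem

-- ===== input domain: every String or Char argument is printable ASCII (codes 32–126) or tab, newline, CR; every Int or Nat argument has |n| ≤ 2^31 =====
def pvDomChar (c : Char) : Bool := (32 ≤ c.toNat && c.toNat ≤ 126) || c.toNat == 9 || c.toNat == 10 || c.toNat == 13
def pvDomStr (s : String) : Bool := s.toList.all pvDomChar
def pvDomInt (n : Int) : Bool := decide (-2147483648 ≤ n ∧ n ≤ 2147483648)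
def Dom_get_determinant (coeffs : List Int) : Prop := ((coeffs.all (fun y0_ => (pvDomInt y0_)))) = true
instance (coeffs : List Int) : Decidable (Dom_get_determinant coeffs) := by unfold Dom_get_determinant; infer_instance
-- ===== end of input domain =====

-- B evaluates P(-1) by Horner's recurrence over the reversed coefficients instead of A's parity-branched alternating sum (objective: alternative; same cost).


-- ===== PORT A =====
def get_determinant (coeffs : List Int) : Int :=
  let val := (PySem.List.enumerate coeffs).foldl
    (fun val ic => if PySem.Int.mod ic.1 2 == 0 then val + ic.2 else val - ic.2) 0
  |val|

-- ===== PORT B =====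
def get_determinant_alt (coeffs : List Int) : Int :=
  let val := coeffs.reverse.foldl (fun val c => val * (-1) + c) 0
  |val|

-- ===== PRECONDITION & SPEC =====
def Spec_get_determinant (coeffs : List Int) (out : Int) : Prop := out = get_determinant_alt coeffs
instance (coeffs : List Int) (out : Int) : Decidable (Spec_get_determinant coeffs out) := by unfold Spec_get_determinant; infer_instance

-- ===== CLAIM (what is proved, stated in full; the proofs are below) =====
def Claim_equal_get_determinant : Prop := ∀ (coeffs : List Int), Dom_get_determinant coeffs → Spec_get_determinant coeffs (get_determinant coeffs)

-- ===== LEMMAS AND PROOFS =====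

-- signed alternating sum S (c :: cs) = c - S cs
def pvAltSum : List Int → Int
  | [] => 0
  | c :: cs => c - pvAltSum cs

theorem pvB_eq (cs : List Int) :
    cs.reverse.foldl (fun val c => val * (-1) + c) 0 = pvAltSum cs := by
  induction cs with
  | nil => rfl
  | cons c cs ih =>
      simp only [List.reverse_cons, List.foldl_append, List.foldl_cons, List.foldl_nil, ih,
        pvAltSum]
      ring

theorem pvA_fold (cs : List Int) : ∀ (s : Int) (v : Int), 0 ≤ s →
    (PySem.List.enumerate cs s).foldl
      (fun val ic => if PySem.Int.mod ic.1 2 == 0 then val + ic.2 else val - ic.2) v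
    = v + (if PySem.Int.mod s 2 = 0 then pvAltSum cs else -pvAltSum cs) := by
  induction cs with
  | nil => intro s v _; simp [PySem.List.enumerate_nil, pvAltSum]
  | cons c cs ih =>
      intro s v hs
      rw [PySem.List.enumerate_cons, List.foldl_cons, ih (s+1) _ (by omega)]
      have hb : s % 2 = 0 ∨ s % 2 = 1 := Int.emod_two_eq_zero_or_one s
      rcases hb with h | h
      · have h1 : (s+1) % 2 = 1 := by omega
        simp [h, h1, pvAltSum]; ring
      · have h1 : (s+1) % 2 = 0 := by omega
        simp [h, h1, pvAltSum]; ring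

-- ===== VERDICT (by name: the statement is the Claim_ definition above) =====
theorem get_determinant_spec : Claim_equal_get_determinant := by
  intro coeffs _
  unfold Spec_get_determinant get_determinant get_determinant_alt
  rw [pvB_eq, pvA_fold coeffs 0 0 le_rfl]
  norm_num [PySem.Int.mod]
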